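-- pv_equiv track=rewrite | github.com/phamdt/schwab-core | schwab_core/symbol/parser.py | parse_option_type
-- ===== SOURCE A (Python) =====
-- class OptionSymbolParseError(Exception):
--     """Exception raised when unable to parse option symbol."""
--     pass
--
-- def parse_option_type(symbol: str) -> str:
--     """
--     Extract option type (CALL/PUT) from symbol.
--
--     Args:
--         symbol: Option symbol
--
--     Returns:
--         'CALL' or 'PUT'
--
--     Raises:
--         OptionSymbolParseError: If option type cannot be determined
--     """
--     symbol_upper = symbol.upper()
--
--     # Look for C or P indicator
--     if 'C' in symbol_upper:
--         # Find last C that's likely the option type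
--         for i in range(len(symbol_upper) - 1, -1, -1):
--             if symbol_upper[i] == 'C':
--                 # Check if this is part of the option type (not underlying)
--                 # Usually followed by digits (strike)
--                 if i < len(symbol_upper) - 1 and symbol_upper[i + 1].isdigit():
--                     return 'CALL'
--
--     if 'P' in symbol_upper:
--         # Find last P that's likely the option type
--         for i in range(len(symbol_upper) - 1, -1, -1):
--             if symbol_upper[i] == 'P':
--                 # Check if this is part of the option type (not underlying)
--                 if i < len(symbol_upper) - 1 and symbol_upper[i + 1].isdigit():
--                     return 'PUT'
--
--     raise OptionSymbolParseError(f"Cannot determine option type from symbol: {symbol}")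
-- ===== SOURCE B (Python) =====
-- class OptionSymbolParseError(Exception):
--     """Exception raised when unable to parse option symbol."""
--     pass
--
--
-- def parse_option_type(symbol: str) -> str:
--     u = symbol.upper()
--     has_call = False
--     has_put = False
--     for ch, nxt in zip(u, u[1:]):
--         if nxt.isdigit():
--             if ch == 'C':
--                 has_call = True
--             elif ch == 'P':
--                 has_put = True
--     if has_call:
--         return 'CALL'
--     if has_put:
--         return 'PUT'
--     raise OptionSymbolParseError(f"Cannot determine option type from symbol: {symbol}")
-- ===== Notes on version B (the rewrite author's own statement) =====
-- stated objective: simpler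
-- what changed: Replaces A's two membership tests plus two separate backward index scans by one forward pass over adjacent character pairs maintaining two boolean flags, deciding CALL/PUT/raise after the pass.
import Mathlib
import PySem

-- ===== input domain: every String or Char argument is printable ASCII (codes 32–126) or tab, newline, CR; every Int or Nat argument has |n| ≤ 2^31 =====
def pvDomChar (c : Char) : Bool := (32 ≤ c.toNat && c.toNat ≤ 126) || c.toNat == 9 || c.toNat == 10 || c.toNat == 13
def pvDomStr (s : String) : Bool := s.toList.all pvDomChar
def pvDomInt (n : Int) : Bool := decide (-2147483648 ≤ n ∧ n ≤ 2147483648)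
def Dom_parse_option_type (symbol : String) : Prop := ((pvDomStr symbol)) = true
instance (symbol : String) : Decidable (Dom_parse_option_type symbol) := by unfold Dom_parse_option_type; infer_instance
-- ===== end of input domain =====

-- B replaces A's two membership tests plus two backward index scans by one forward pass
-- over adjacent character pairs maintaining two boolean flags (objective: simpler).


-- ===== PORT A =====
-- A's `i < len(u) - 1 and u[i+1].isdigit()` is ported as a lookup of u[i+1]?:
-- it is `some d` exactly when i < len(u) - 1, and then the digit test runs on d.
def pvNextDigit (u : List Char) (i : Nat) : Bool :=
  match u[i+1]? with
  | some d => PySem.Chars.isdigit d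
  | none => false

-- the backward `for i in range(len(u)-1, -1, -1): if u[i]==c and …: return` loop:
-- pvScanA u c (i+1) examines index i, then the smaller indices
def pvScanA (u : List Char) (c : Char) : Nat → Bool
  | 0 => false
  | i + 1 => if u[i]? == some c && pvNextDigit u i then true else pvScanA u c i

def parse_option_type (symbol : String) : String :=
  let u := (PySem.Str.upper symbol).toList
  if PySem.Chars.isIn ['C'] u && pvScanA u 'C' u.length then "CALL"
  else if PySem.Chars.isIn ['P'] u && pvScanA u 'P' u.length then "PUT"
  else ""  -- Python raises OptionSymbolParseError here; excluded by Pre_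

-- ===== PORT B =====
def pvStepB (st : Bool × Bool) (p : Char × Char) : Bool × Bool :=
  if PySem.Chars.isdigit p.2 then
    if p.1 == 'C' then (true, st.2)
    else if p.1 == 'P' then (st.1, true)
    else st
  else st

def parse_option_type_alt (symbol : String) : String :=
  let u := (PySem.Str.upper symbol).toList
  let st := (u.zip (u.drop 1)).foldl pvStepB (false, false)
  if st.1 then "CALL"
  else if st.2 then "PUT"
  else ""  -- raise OptionSymbolParseError; excluded by Pre_

-- ===== PRECONDITION & SPEC =====
-- Pre_ excludes exactly the symbols with no 'C' or 'P' (case-insensitive) immediately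
-- followed by a digit: there the Python A raises OptionSymbolParseError.
def Pre_parse_option_type (symbol : String) : Prop :=
  (((PySem.Str.upper symbol).toList.zip ((PySem.Str.upper symbol).toList.drop 1)).any
    (fun p => (p.1 == 'C' || p.1 == 'P') && PySem.Chars.isdigit p.2)) = true
instance (symbol : String) : Decidable (Pre_parse_option_type symbol) := by
  unfold Pre_parse_option_type; infer_instance

def pvWitness_parse_option_type : String := "XYZc150"

def Spec_parse_option_type (symbol : String) (out : String) : Prop := out = parse_option_type_alt symbol
instance (symbol : String) (out : String) : Decidable (Spec_parse_option_type symbol out) := by unfold Spec_parse_option_type; infer_instance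

-- ===== CLAIM (what is proved, stated in full; the proofs are below) =====
def Claim_equal_parse_option_type : Prop := ∀ (symbol : String), Dom_parse_option_type symbol → Pre_parse_option_type symbol → Spec_parse_option_type symbol (parse_option_type symbol)

-- ===== LEMMAS AND PROOFS =====

-- the pair predicate the scans decide
def pvHit (u : List Char) (c : Char) (i : Nat) : Prop :=
  u[i]? = some c ∧ ∃ d, u[i+1]? = some d ∧ PySem.Chars.isdigit d = true

theorem pvScanA_iff (u : List Char) (c : Char) (n : Nat) :
    pvScanA u c n = true ↔ ∃ i < n, pvHit u c i := by
  induction n with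
  | zero => simp [pvScanA]
  | succ m ih =>
    simp only [pvScanA]
    constructor
    · intro h
      split at h
      · rename_i hc
        simp only [Bool.and_eq_true, beq_iff_eq] at hc
        refine ⟨m, by omega, hc.1, ?_⟩
        have := hc.2
        unfold pvNextDigit at this
        cases hd : u[m+1]? with
        | none => rw [hd] at this; simp at this
        | some d => rw [hd] at this; exact ⟨d, rfl, this⟩
      · obtain ⟨i, hi, hh⟩ := ih.mp h
        exact ⟨i, by omega, hh⟩
    · rintro ⟨i, hi, hh⟩
      by_cases he : i = m
      · subst he
        obtain ⟨h1, d, h2, h3⟩ := hh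
        have : (u[i]? == some c && pvNextDigit u i) = true := by
          simp [h1, pvNextDigit, h2, h3]
        simp [this]
      · have : pvScanA u c m = true := ih.mpr ⟨i, by omega, hh⟩
        split <;> simp [this]

theorem pvZipAny_iff (u : List Char) (f : Char × Char → Bool) :
    (u.zip (u.drop 1)).any f = true ↔
      ∃ i a d, u[i]? = some a ∧ u[i+1]? = some d ∧ f (a, d) = true := by
  induction u with
  | nil => simp
  | cons x t ih =>
    cases t with
    | nil => simp
    | cons y t' =>
      simp only [List.drop_succ_cons, List.drop_zero] at ih ⊢
      simp only [List.zip_cons_cons, List.any_cons, Bool.or_eq_true]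
      rw [ih]
      constructor
      · rintro (h | ⟨i, a, d, h1, h2, h3⟩)
        · exact ⟨0, x, y, rfl, rfl, h⟩
        · exact ⟨i + 1, a, d, by simpa using h1, by simpa using h2, h3⟩
      · rintro ⟨i, a, d, h1, h2, h3⟩
        cases i with
        | zero =>
          simp only [List.getElem?_cons_zero, Option.some.injEq] at h1
          have h2' : (y :: t')[0]? = some d := by simpa using h2
          simp only [List.getElem?_cons_zero, Option.some.injEq] at h2'
          subst h1; subst h2'
          exact Or.inl h3
        | succ j =>
          exact Or.inr ⟨j, a, d, by simpa using h1, by simpa using h2, h3⟩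

theorem pvFoldB (l : List (Char × Char)) (a b : Bool) :
    l.foldl pvStepB (a, b) =
      (a || l.any (fun p => p.1 == 'C' && PySem.Chars.isdigit p.2),
       b || l.any (fun p => p.1 == 'P' && PySem.Chars.isdigit p.2)) := by
  induction l generalizing a b with
  | nil => simp
  | cons p t ih =>
    simp only [List.foldl_cons, List.any_cons]
    rw [pvStepB]
    split
    · rename_i hd
      by_cases hc : p.1 = 'C'
      · simp [hc, hd, ih]
      · by_cases hp : p.1 = 'P'
        · simp [hp, hd, ih]
        · simp [show (p.1 == 'C') = false by simpa using hc,
                show (p.1 == 'P') = false by simpa using hp, hd, ih]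
    · rename_i hd
      simp only [Bool.not_eq_true] at hd
      simp [hd, ih]

-- a flag of B is exactly the corresponding scan of A
theorem pvFlag_eq_scan (u : List Char) (c : Char) :
    (u.zip (u.drop 1)).any (fun p => p.1 == c && PySem.Chars.isdigit p.2)
      = pvScanA u c u.length := by
  rw [Bool.eq_iff_iff, pvZipAny_iff, pvScanA_iff]
  constructor
  · rintro ⟨i, a, d, h1, h2, h3⟩
    simp only [Bool.and_eq_true, beq_iff_eq] at h3
    refine ⟨i, ?_, by rw [h1, h3.1], d, h2, h3.2⟩
    obtain ⟨hlt, -⟩ := List.getElem?_eq_some_iff.mp h1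
    exact hlt
  · rintro ⟨i, _, h1, d, h2, h3⟩
    exact ⟨i, c, d, h1, h2, by simp [h3]⟩

-- when the scan succeeds, the character really occurs, so A's `c in u` guard is true
theorem pvIsIn_of_scan (u : List Char) (c : Char)
    (h : pvScanA u c u.length = true) : PySem.Chars.isIn [c] u = true := by
  obtain ⟨i, _, h1, -⟩ := (pvScanA_iff u c u.length).mp h
  have hm : c ∈ u := List.mem_of_getElem? h1
  obtain ⟨s, t, rfl⟩ := List.append_of_mem hm
  rw [PySem.Chars.isIn_iff_infix]
  exact ⟨s, t, by simp⟩

-- ===== VERDICT (by name: the statement is the Claim_ definition above) =====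
theorem parse_option_type_spec : Claim_equal_parse_option_type := by
  intro symbol _ _
  unfold Spec_parse_option_type parse_option_type parse_option_type_alt
  simp only [pvFoldB, Bool.false_or, pvFlag_eq_scan]
  set u := (PySem.Str.upper symbol).toList with hu
  by_cases hC : pvScanA u 'C' u.length = true
  · simp [hC, pvIsIn_of_scan u 'C' hC]
  · simp only [Bool.not_eq_true] at hC
    by_cases hP : pvScanA u 'P' u.length = true
    · simp [hC, hP, pvIsIn_of_scan u 'P' hP]
    · simp only [Bool.not_eq_true] at hP
      simp [hC, hP]
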